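-- pv_equiv track=rewrite | github.com/ImmaBawzz/LJV_Visual_Engine | 05_SCRIPTS/core/05_generate_ass_from_txt.py | choose_break_index
-- ===== SOURCE A (Python) =====
-- BREAK_WORDS = {
--     "and",
--     "but",
--     "while",
--     "when",
--     "where",
--     "now",
--     "every",
--     "from",
--     "like",
--     "with",
--     "that",
-- }
--
-- def choose_break_index(words):
--     if len(words) <= 1:
--         return 1
--
--     midpoint = len(words) // 2
--     min_side = 2 if len(words) >= 5 else 1
--     candidates = []
--     for index in range(1, len(words)):
--         if index < min_side or len(words) - index < min_side:
--             continue
--         previous = words[index - 1].lower().rstrip(",;:")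
--         current = words[index].lower().rstrip(",;:")
--         if words[index - 1].endswith((",", ";", ":")):
--             candidates.append(index)
--         elif current in BREAK_WORDS or previous in BREAK_WORDS:
--             candidates.append(index)
--
--     if candidates:
--         return min(candidates, key=lambda value: abs(value - midpoint))
--     return max(min_side, min(len(words) - min_side, midpoint))
-- ===== SOURCE B (Python) =====
-- BREAK_WORDS = {
--     "and",
--     "but",
--     "while",
--     "when",
--     "where",
--     "now",
--     "every",
--     "from",
--     "like",
--     "with",
--     "that",
-- }
--
--
-- def _qualifies(words, index, min_side):
--     if index < min_side or len(words) - index < min_side: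
--         return False
--     if words[index - 1].endswith((",", ";", ":")):
--         return True
--     previous = words[index - 1].lower().rstrip(",;:")
--     current = words[index].lower().rstrip(",;:")
--     return current in BREAK_WORDS or previous in BREAK_WORDS
--
--
-- def choose_break_index(words):
--     if len(words) <= 1:
--         return 1
--     midpoint = len(words) // 2
--     min_side = 2 if len(words) >= 5 else 1
--     for d in range(len(words)):
--         if _qualifies(words, midpoint - d, min_side):
--             return midpoint - d
--         if _qualifies(words, midpoint + d, min_side):
--             return midpoint + d
--     return max(min_side, min(len(words) - min_side, midpoint))
-- ===== Notes on version B (the rewrite author's own statement) =====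
-- stated objective: alternative
-- what changed: B replaces A's 'collect every candidate index, then take min by distance to the midpoint' with an outward scan from the midpoint (checking midpoint-d before midpoint+d to keep the lower-index tie-break) that returns the first qualifying index, falling back to the bounded midpoint when nothing qualifies.
import Mathlib
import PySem

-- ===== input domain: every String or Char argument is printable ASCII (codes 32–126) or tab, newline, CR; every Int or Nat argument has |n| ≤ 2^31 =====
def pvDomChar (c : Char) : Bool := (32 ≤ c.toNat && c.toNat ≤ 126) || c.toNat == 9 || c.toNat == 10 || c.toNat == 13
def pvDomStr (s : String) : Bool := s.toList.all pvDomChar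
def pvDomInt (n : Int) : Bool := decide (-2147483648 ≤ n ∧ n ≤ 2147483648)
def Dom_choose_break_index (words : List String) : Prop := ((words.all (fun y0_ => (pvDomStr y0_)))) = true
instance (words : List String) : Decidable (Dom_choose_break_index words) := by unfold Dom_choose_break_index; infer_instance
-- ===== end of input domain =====

-- B replaces A's "collect all candidate indices, then min by distance to the midpoint" with an
-- outward scan from the midpoint that returns the first qualifying index (objective: alternative).

-- ===== PORT A =====
-- BREAK_WORDS (a Python set of string literals)
def pvBreakWords : PySem.Set String :=
  PySem.Set.ofList ["and", "but", "while", "when", "where", "now", "every", "from", "like", "with", "that"]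

-- s.rstrip(",;:") ported by hand (PySem has no rstrip-with-chars): drop trailing chars from
-- {',', ';', ':'} — exact for this fixed ASCII char set.
def pvRstripPunct (s : String) : String :=
  String.ofList ((s.toList.reverse.dropWhile (fun c => c == ',' || c == ';' || c == ':')).reverse)

-- s.endswith((",", ";", ":")) : endswith with a tuple = any of the three
def pvEndsPunct (s : String) : Bool :=
  PySem.Str.endswith s "," || PySem.Str.endswith s ";" || PySem.Str.endswith s ":"

def choose_break_index (words : List String) : Int :=
  if PySem.List.len words ≤ 1 then 1
  else
    let midpoint := PySem.Int.floordiv (PySem.List.len words) 2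
    let min_side : Int := if PySem.List.len words ≥ 5 then 2 else 1
    let candidates : List Int :=
      (PySem.List.pyRange 1 (PySem.List.len words)).foldl
        (fun acc index =>
          if index < min_side || PySem.List.len words - index < min_side then acc
          else
            let previous := pvRstripPunct (PySem.Str.lower (PySem.List.pyGetD words (index - 1) ""))
            let current := pvRstripPunct (PySem.Str.lower (PySem.List.pyGetD words index ""))
            if pvEndsPunct (PySem.List.pyGetD words (index - 1) "") then acc ++ [index]
            else if PySem.Set.contains pvBreakWords current || PySem.Set.contains pvBreakWords previous then
              acc ++ [index]
            else acc)
        []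
    if candidates ≠ [] then
      -- min(candidates, key=…): candidates ≠ [] here, so min? is some; getD's default is never used
      (PySem.List.min? candidates (fun value => |value - midpoint|)).getD 0
    else max min_side (min (PySem.List.len words - min_side) midpoint)

-- ===== PORT B =====
-- _qualifies(words, index, min_side) of Source B
def pvQualifies (words : List String) (index : Int) (min_side : Int) : Bool :=
  if index < min_side || PySem.List.len words - index < min_side then false
  else if pvEndsPunct (PySem.List.pyGetD words (index - 1) "") then true
  else
    let previous := pvRstripPunct (PySem.Str.lower (PySem.List.pyGetD words (index - 1) ""))
    let current := pvRstripPunct (PySem.Str.lower (PySem.List.pyGetD words index ""))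
    PySem.Set.contains pvBreakWords current || PySem.Set.contains pvBreakWords previous

-- the 'for d in range(len(words))' outward scan, as fuel recursion; fuel counts the remaining d's
def pvScan (words : List String) (midpoint : Int) (min_side : Int) : Nat → Nat → Int
  | 0, _ => max min_side (min (PySem.List.len words - min_side) midpoint)
  | fuel + 1, d =>
      if pvQualifies words (midpoint - d) min_side then midpoint - d
      else if pvQualifies words (midpoint + d) min_side then midpoint + d
      else pvScan words midpoint min_side fuel (d + 1)

def choose_break_index_alt (words : List String) : Int :=
  if PySem.List.len words ≤ 1 then 1
  else
    let midpoint := PySem.Int.floordiv (PySem.List.len words) 2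
    let min_side : Int := if PySem.List.len words ≥ 5 then 2 else 1
    pvScan words midpoint min_side words.length 0

-- ===== PRECONDITION & SPEC =====
def Spec_choose_break_index (words : List String) (out : Int) : Prop := out = choose_break_index_alt words
instance (words : List String) (out : Int) : Decidable (Spec_choose_break_index words out) := by unfold Spec_choose_break_index; infer_instance

-- ===== CLAIM (what is proved, stated in full; the proofs are below) =====
def Claim_equal_choose_break_index : Prop := ∀ (words : List String), Dom_choose_break_index words → Spec_choose_break_index words (choose_break_index words)

-- ===== LEMMAS AND PROOFS =====

-- "r is the qualifying index nearest the midpoint, ties to the lower index"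
def pvGood (words : List String) (mid ms r : Int) : Prop :=
  pvQualifies words r ms = true ∧
    ∀ y : Int, pvQualifies words y ms = true →
      |r - mid| < |y - mid| ∨ (|r - mid| = |y - mid| ∧ r ≤ y)

theorem pvGood_unique {words : List String} {mid ms r r' : Int}
    (h : pvGood words mid ms r) (h' : pvGood words mid ms r') : r = r' := by
  rcases h with ⟨hq, hmin⟩
  rcases h' with ⟨hq', hmin'⟩
  rcases hmin r' hq' with h1 | ⟨h1, h2⟩ <;> rcases hmin' r hq with h3 | ⟨h3, h4⟩
  · exact absurd (h1.trans h3) (lt_irrefl _)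
  · rw [h3] at h1; exact absurd h1 (lt_irrefl _)
  · rw [h1] at h3; exact absurd h3 (lt_irrefl _)
  · exact le_antisymm h2 h4

theorem pvQualifies_bounds {words : List String} {y ms : Int}
    (h : pvQualifies words y ms = true) : ms ≤ y ∧ y ≤ PySem.List.len words - ms := by
  unfold pvQualifies at h
  split at h
  · exact absurd h (by simp)
  · rename_i hc
    simp only [Bool.or_eq_true, decide_eq_true_eq, not_or, not_lt] at hc
    omega

-- candidates list of A = filter of the qualifying predicate over range(1, n)
theorem pvCandidates_eq (words : List String) (ms : Int) :
    ((PySem.List.pyRange 1 (PySem.List.len words)).foldl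
      (fun acc index =>
        if index < ms || PySem.List.len words - index < ms then acc
        else
          if pvEndsPunct (PySem.List.pyGetD words (index - 1) "") then acc ++ [index]
          else if PySem.Set.contains pvBreakWords (pvRstripPunct (PySem.Str.lower (PySem.List.pyGetD words index ""))) ||
              PySem.Set.contains pvBreakWords (pvRstripPunct (PySem.Str.lower (PySem.List.pyGetD words (index - 1) ""))) then
            acc ++ [index]
          else acc)
      []) =
    (PySem.List.pyRange 1 (PySem.List.len words)).filter (fun i => pvQualifies words i ms) := by
  have hfun : ∀ (acc : List Int) (index : Int),
      (if index < ms || PySem.List.len words - index < ms then acc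
        else
          if pvEndsPunct (PySem.List.pyGetD words (index - 1) "") then acc ++ [index]
          else if PySem.Set.contains pvBreakWords (pvRstripPunct (PySem.Str.lower (PySem.List.pyGetD words index ""))) ||
              PySem.Set.contains pvBreakWords (pvRstripPunct (PySem.Str.lower (PySem.List.pyGetD words (index - 1) ""))) then
            acc ++ [index]
          else acc) =
      (if pvQualifies words index ms then acc ++ [index] else acc) := by
    intro acc index
    unfold pvQualifies
    split_ifs <;> simp_all
  calc (PySem.List.pyRange 1 (PySem.List.len words)).foldl _ [] =
      (PySem.List.pyRange 1 (PySem.List.len words)).foldl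
        (fun acc index => if pvQualifies words index ms then acc ++ [index] else acc) [] := by
        apply PySem.List.foldl_congr_mem
        intro acc index _
        exact hfun acc index
    _ = _ := by
        simpa using PySem.List.foldl_append_if_eq_filter (fun i => pvQualifies words i ms)
          (PySem.List.pyRange 1 (PySem.List.len words)) []

-- the step function of PySem.List.min?, named so the lemmas below can refer to it
def pvStep (key : Int → Int) (acc : Option Int) (x : Int) : Option Int :=
  match acc with
  | none => some x
  | some b => if key x < key b then some x else some b

theorem pvMin?_eq_foldl (xs : List Int) (key : Int → Int) :
    PySem.List.min? xs key = xs.foldl (pvStep key) none := by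
  unfold PySem.List.min?
  congr 1
  funext acc x
  cases acc <;> rfl

-- the inner foldl of PySem.List.min? keeps the FIRST minimal element; on a strictly
-- increasing list "first" means "least index value at equal key"
theorem pvFoldlMin_spec (key : Int → Int) :
    ∀ (t : List Int) (a m : Int), t.Pairwise (· < ·) → (∀ y ∈ t, a < y) →
      t.foldl (pvStep key) (some a) = some m →
      (m = a ∨ m ∈ t) ∧ key m ≤ key a ∧ (∀ y ∈ t, key m ≤ key y) ∧
        (∀ y : Int, (y = a ∨ y ∈ t) → key m = key y → m ≤ y) := by
  intro t
  induction t with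
  | nil =>
      intro a m _ _ h
      simp only [List.foldl_nil, Option.some.injEq] at h
      subst h
      refine ⟨Or.inl rfl, le_refl _, by simp, ?_⟩
      rintro y (rfl | hy) _
      · exact le_refl _
      · simp at hy
  | cons x t ih =>
      intro a m hp ha h
      simp only [List.foldl_cons, pvStep] at h
      have hpt : t.Pairwise (· < ·) := hp.of_cons
      have hxt : ∀ y ∈ t, x < y := fun y hy => (List.pairwise_cons.mp hp).1 y hy
      by_cases hk : key x < key a
      · simp only [hk, if_pos] at h
        obtain ⟨hm1, hm2, hm3, hm4⟩ := ih x m hpt hxt h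
        refine ⟨?_, ?_, ?_, ?_⟩
        · rcases hm1 with rfl | hm1
          · exact Or.inr (List.mem_cons_self)
          · exact Or.inr (List.mem_cons_of_mem _ hm1)
        · exact le_of_lt (lt_of_le_of_lt hm2 hk)
        · intro y hy
          rcases List.mem_cons.mp hy with rfl | hy
          · exact hm2
          · exact hm3 y hy
        · rintro y (rfl | hy) hkey
          · exact absurd hkey (by have := lt_of_le_of_lt hm2 hk; omega)
          · rcases List.mem_cons.mp hy with rfl | hy
            · exact hm4 y (Or.inl rfl) hkey
            · exact hm4 y (Or.inr hy) hkey
      · simp only [hk, if_false] at h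
        have hat : ∀ y ∈ t, a < y := fun y hy => lt_trans (ha x List.mem_cons_self) (hxt y hy)
        obtain ⟨hm1, hm2, hm3, hm4⟩ := ih a m hpt hat h
        refine ⟨?_, hm2, ?_, ?_⟩
        · rcases hm1 with rfl | hm1
          · exact Or.inl rfl
          · exact Or.inr (List.mem_cons_of_mem _ hm1)
        · intro y hy
          rcases List.mem_cons.mp hy with rfl | hy
          · exact le_trans hm2 (le_of_not_gt hk)
          · exact hm3 y hy
        · rintro y (rfl | hy) hkey
          · exact hm4 y (Or.inl rfl) hkey
          · rcases List.mem_cons.mp hy with rfl | hy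
            · -- key m = key x, and key m ≤ key a ≤ key x forces key m = key a, so m ≤ a < x
              have hax : key a ≤ key y := le_of_not_gt hk
              have : key m = key a := le_antisymm hm2 (by omega)
              have hma : m ≤ a := hm4 a (Or.inl rfl) this
              exact le_of_lt (lt_of_le_of_lt hma (ha y List.mem_cons_self))
            · exact hm4 y (Or.inr hy) hkey

theorem pvMin?_good {words : List String} {mid ms : Int} {l : List Int} {m : Int}
    (hl : l.Pairwise (· < ·))
    (hmem : ∀ y : Int, pvQualifies words y ms = true ↔ y ∈ l)
    (h : PySem.List.min? l (fun v => |v - mid|) = some m) :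
    pvGood words mid ms m := by
  cases l with
  | nil => simp [PySem.List.min?] at h
  | cons x t =>
      have hxt : ∀ y ∈ t, x < y := fun y hy => (List.pairwise_cons.mp hl).1 y hy
      rw [pvMin?_eq_foldl] at h
      simp only [List.foldl_cons, pvStep] at h
      obtain ⟨hm1, hm2, hm3, hm4⟩ :=
        pvFoldlMin_spec (fun v => |v - mid|) t x m hl.of_cons hxt h
      have hmml : m ∈ x :: t := by
        rcases hm1 with rfl | hm1
        · exact List.mem_cons_self
        · exact List.mem_cons_of_mem _ hm1
      refine ⟨(hmem m).mpr hmml, ?_⟩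
      intro y hy
      have hyl : y ∈ x :: t := (hmem y).mp hy
      have hle : |m - mid| ≤ |y - mid| := by
        rcases List.mem_cons.mp hyl with rfl | hyt
        · exact hm2
        · exact hm3 y hyt
      rcases lt_or_eq_of_le hle with hlt | heq
      · exact Or.inl hlt
      · refine Or.inr ⟨heq, ?_⟩
        rcases List.mem_cons.mp hyl with rfl | hyt
        · exact hm4 y (Or.inl rfl) heq
        · exact hm4 y (Or.inr hyt) heq

-- the outward scan either finds the first-by-distance (ties: lower index) qualifying index,
-- or, if nothing qualifies, falls through to the bounded midpoint
theorem pvScan_spec (words : List String) (mid ms : Int) :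
    ∀ (fuel d : Nat),
      (∀ y : Int, pvQualifies words y ms = true → (d : Int) ≤ |y - mid|) →
      (∀ y : Int, pvQualifies words y ms = true → |y - mid| < (d : Int) + fuel) →
      pvGood words mid ms (pvScan words mid ms fuel d) ∨
        ((∀ y : Int, pvQualifies words y ms = false) ∧
          pvScan words mid ms fuel d = max ms (min (PySem.List.len words - ms) mid)) := by
  intro fuel
  induction fuel with
  | zero =>
      intro d hlo hhi
      refine Or.inr ⟨?_, rfl⟩
      intro y
      by_contra hy
      simp only [Bool.not_eq_false] at hy
      have h1 := hlo y hy
      have h2 := hhi y hy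
      push_cast at h2
      linarith
  | succ fuel ih =>
      intro d hlo hhi
      unfold pvScan
      by_cases h1 : pvQualifies words (mid - d) ms = true
      · rw [if_pos h1]
        refine Or.inl ⟨h1, ?_⟩
        intro y hy
        have hd := hlo y hy
        have habs : |mid - (d : Int) - mid| = (d : Int) := by
          rw [show mid - (d : Int) - mid = -(d : Int) by ring, abs_neg,
            abs_of_nonneg (by positivity : (0:Int) ≤ (d : Int))]
        rcases lt_or_eq_of_le hd with hlt | heqd
        · exact Or.inl (by rw [habs]; exact hlt)
        · have hy2 : y - mid = (d : Int) ∨ y - mid = -(d : Int) :=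
            (abs_eq (by positivity : (0:Int) ≤ (d : Int))).mp heqd.symm
          exact Or.inr ⟨by rw [habs, heqd], by omega⟩
      · rw [if_neg h1]
        by_cases h2 : pvQualifies words (mid + d) ms = true
        · rw [if_pos h2]
          refine Or.inl ⟨h2, ?_⟩
          intro y hy
          have hd := hlo y hy
          have habs : |mid + (d : Int) - mid| = (d : Int) := by
            rw [show mid + (d : Int) - mid = (d : Int) by ring,
              abs_of_nonneg (by positivity : (0:Int) ≤ (d : Int))]
          rcases lt_or_eq_of_le hd with hlt | heqd
          · exact Or.inl (by rw [habs]; exact hlt)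
          · -- |y - mid| = d; y = mid - d is ruled out because it does not qualify
            have hy2 : y - mid = (d : Int) ∨ y - mid = -(d : Int) :=
              (abs_eq (by positivity : (0:Int) ≤ (d : Int))).mp heqd.symm
            have hy' : y = mid - (d : Int) ∨ y = mid + (d : Int) := by omega
            rcases hy' with rfl | rfl
            · exact absurd hy h1
            · exact Or.inr ⟨by rw [habs, heqd], le_refl _⟩
        · rw [if_neg h2]
          apply ih (d + 1)
          · intro y hy
            have hd := hlo y hy
            rcases lt_or_eq_of_le hd with hlt | heqd
            · push_cast
              linarith
            · have hy2 : y - mid = (d : Int) ∨ y - mid = -(d : Int) :=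
                (abs_eq (by positivity : (0:Int) ≤ (d : Int))).mp heqd.symm
              have hy' : y = mid - (d : Int) ∨ y = mid + (d : Int) := by omega
              rcases hy' with rfl | rfl
              · exact absurd hy h1
              · exact absurd hy h2
          · intro y hy
            have := hhi y hy
            push_cast at this ⊢
            linarith

-- A's branch structure (min over the candidate list vs. fallback) equals B's outward scan,
-- for an abstract midpoint and side bound
theorem pvMain (words : List String) (mid ms : Int)
    (hms1 : 1 ≤ ms)
    (hmid : 0 ≤ mid ∧ mid ≤ (words.length : Int) - 1) :
    (if (PySem.List.pyRange 1 (PySem.List.len words)).filter (fun i => pvQualifies words i ms) ≠ [] then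
        (PySem.List.min?
          ((PySem.List.pyRange 1 (PySem.List.len words)).filter (fun i => pvQualifies words i ms))
          (fun value => |value - mid|)).getD 0
      else max ms (min (PySem.List.len words - ms) mid)) =
      pvScan words mid ms words.length 0 := by
  have hqb : ∀ y : Int, pvQualifies words y ms = true → 1 ≤ y ∧ y ≤ (words.length : Int) - 1 := by
    intro y hy
    have hb := pvQualifies_bounds hy
    simp only [PySem.List.len_eq] at hb
    omega
  have hlp : ((PySem.List.pyRange 1 (PySem.List.len words)).filter
      (fun i => pvQualifies words i ms)).Pairwise (· < ·) :=
    List.Pairwise.filter _ (PySem.List.pairwise_lt_pyRange_one 1 (PySem.List.len words))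
  have hmem : ∀ y : Int, pvQualifies words y ms = true ↔
      y ∈ (PySem.List.pyRange 1 (PySem.List.len words)).filter (fun i => pvQualifies words i ms) := by
    intro y
    constructor
    · intro hy
      rw [List.mem_filter]
      refine ⟨PySem.List.mem_pyRange_one.mpr ?_, hy⟩
      have := hqb y hy
      simp only [PySem.List.len_eq]
      omega
    · intro hy
      exact (List.mem_filter.mp hy).2
  have hscan := pvScan_spec words mid ms words.length 0
    (fun y _ => by positivity)
    (by
      intro y hy
      have hb := hqb y hy
      have habs : |y - mid| < (words.length : Int) := by
        rw [abs_lt]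
        omega
      push_cast
      linarith)
  by_cases hne :
      (PySem.List.pyRange 1 (PySem.List.len words)).filter (fun i => pvQualifies words i ms) ≠ []
  · rw [if_pos hne]
    obtain ⟨m, hm⟩ : ∃ m, PySem.List.min?
        ((PySem.List.pyRange 1 (PySem.List.len words)).filter (fun i => pvQualifies words i ms))
        (fun value => |value - mid|) = some m := by
      rcases Option.eq_none_or_eq_some (PySem.List.min?
          ((PySem.List.pyRange 1 (PySem.List.len words)).filter (fun i => pvQualifies words i ms))
          (fun value => |value - mid|)) with h0 | hs
      · rw [PySem.List.min?_eq_none_iff] at h0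
        exact absurd h0 hne
      · exact hs
    rw [hm]
    have hgoodA : pvGood words mid ms m := pvMin?_good hlp hmem hm
    rcases hscan with hgoodB | ⟨hnoQ, _⟩
    · simpa using pvGood_unique hgoodA hgoodB
    · exact absurd hgoodA.1 (by simp [hnoQ m])
  · rw [if_neg hne]
    rw [not_ne_iff] at hne
    rcases hscan with hgoodB | ⟨_, heq⟩
    · have hmm := (hmem _).mp hgoodB.1
      rw [hne] at hmm
      simp at hmm
    · exact heq.symm

-- ===== VERDICT (by name: the statement is the Claim_ definition above) =====
theorem choose_break_index_spec : Claim_equal_choose_break_index := by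
  intro words _
  show choose_break_index words = choose_break_index_alt words
  by_cases hn : PySem.List.len words ≤ 1
  · simp only [choose_break_index, choose_break_index_alt]
    rw [if_pos hn, if_pos hn]
  · simp only [choose_break_index, choose_break_index_alt]
    rw [if_neg hn, if_neg hn]
    rw [pvCandidates_eq words (if PySem.List.len words ≥ 5 then (2 : Int) else 1)]
    apply pvMain
    · split_ifs <;> omega
    · simp only [PySem.List.len_eq] at hn
      unfold PySem.Int.floordiv
      rw [Int.fdiv_eq_ediv]
      rw [if_pos (Or.inl (by norm_num : (0 : Int) ≤ 2))]
      simp only [PySem.List.len_eq]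
      omega
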